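-- pv_equiv track=rewrite | github.com/alibatkuldin/xxx | qt_py_n/qt_py_n/Call_history_api/src/Statistics.py | get_incoming_outgoing_calls
-- ===== SOURCE A (Python) =====
-- def get_incoming_outgoing_calls(data):
--     incoming = 0
--     outgoing = 0
--
--     for val in data:
--         if val.get("type") == "incoming":
--             incoming += 1
--         elif val.get("type") == "outgoing":
--             outgoing += 1
--     return (incoming, outgoing)
-- ===== SOURCE B (Python) =====
-- def get_incoming_outgoing_calls(data):
--     # Staged passes: project the type field once, then count each tag with list.count.
--     types = [val.get("type") for val in data]
--     return (types.count("incoming"), types.count("outgoing"))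
-- ===== Notes on version B (the rewrite author's own statement) =====
-- stated objective: simpler
-- what changed: Replaces the single manual loop with two scalar accumulators and an if/elif by staged passes: project the type field into a list once, then count each wanted tag with the built-in list.count.
import Mathlib
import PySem

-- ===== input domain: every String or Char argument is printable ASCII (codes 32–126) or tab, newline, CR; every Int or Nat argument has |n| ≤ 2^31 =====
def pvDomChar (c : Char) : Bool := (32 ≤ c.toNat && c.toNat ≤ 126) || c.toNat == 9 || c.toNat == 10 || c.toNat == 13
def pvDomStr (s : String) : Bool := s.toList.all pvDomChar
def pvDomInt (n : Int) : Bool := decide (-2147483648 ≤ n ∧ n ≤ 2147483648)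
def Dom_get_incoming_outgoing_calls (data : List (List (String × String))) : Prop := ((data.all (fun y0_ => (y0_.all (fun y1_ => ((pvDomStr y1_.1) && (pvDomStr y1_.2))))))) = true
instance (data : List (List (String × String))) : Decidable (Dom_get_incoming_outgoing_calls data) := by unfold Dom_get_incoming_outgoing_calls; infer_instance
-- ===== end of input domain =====

-- B projects the type field once and counts each tag with list.count (staged passes),
-- instead of A's single loop with two scalar accumulators and an if/elif.

-- ===== PORT A =====
def get_incoming_outgoing_calls (data : List (List (String × String))) : Int × Int :=
  data.foldl (fun acc val =>
    if (PySem.Dict.mk val).get? "type" = some "incoming" then (acc.1 + 1, acc.2)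
    else if (PySem.Dict.mk val).get? "type" = some "outgoing" then (acc.1, acc.2 + 1)
    else acc) (0, 0)

-- ===== PORT B =====
def get_incoming_outgoing_calls_alt (data : List (List (String × String))) : Int × Int :=
  let types := data.map (fun val => (PySem.Dict.mk val).get? "type")
  ((PySem.List.count types (some "incoming") : Int), (PySem.List.count types (some "outgoing") : Int))

-- ===== PRECONDITION & SPEC =====
def Spec_get_incoming_outgoing_calls (data : List (List (String × String))) (out : Int × Int) : Prop := out = get_incoming_outgoing_calls_alt data
instance (data : List (List (String × String))) (out : Int × Int) : Decidable (Spec_get_incoming_outgoing_calls data out) := by unfold Spec_get_incoming_outgoing_calls; infer_instance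

-- ===== CLAIM =====
def Claim_equal_get_incoming_outgoing_calls : Prop := ∀ (data : List (List (String × String))), Dom_get_incoming_outgoing_calls data → Spec_get_incoming_outgoing_calls data (get_incoming_outgoing_calls data)

-- ===== LEMMAS AND PROOFS =====
lemma portA_acc (data : List (List (String × String))) (i o : Int) :
    data.foldl (fun acc val =>
      if (PySem.Dict.mk val).get? "type" = some "incoming" then (acc.1 + 1, acc.2)
      else if (PySem.Dict.mk val).get? "type" = some "outgoing" then (acc.1, acc.2 + 1)
      else acc) (i, o)
    = (i + ((data.map (fun val => (PySem.Dict.mk val).get? "type")).count (some "incoming") : Int),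
       o + ((data.map (fun val => (PySem.Dict.mk val).get? "type")).count (some "outgoing") : Int)) := by
  induction data generalizing i o with
  | nil => simp
  | cons hd tl ih =>
    simp only [List.foldl_cons, List.map_cons]
    by_cases h1 : (PySem.Dict.mk hd).get? "type" = some "incoming"
    · simp [h1, ih]; ring
    · by_cases h2 : (PySem.Dict.mk hd).get? "type" = some "outgoing"
      · simp [h2, ih]; ring
      · simp [h1, h2, ih]

-- ===== VERDICT =====
theorem get_incoming_outgoing_calls_spec : Claim_equal_get_incoming_outgoing_calls := by
  intro data _
  unfold Spec_get_incoming_outgoing_calls get_incoming_outgoing_calls get_incoming_outgoing_calls_alt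
  rw [portA_acc]
  simp [PySem.List.count]
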